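-- pv_equiv track=rewrite | github.com/model-railroad/distant-signal | src/drawing_state.py | _parseInt
-- ===== SOURCE A (Python) =====
-- def _parseInt(s:str, sxy:int) -> int:
--     # We don't have re.split("([+-])", str) on CircuitPython
--     res = 0
--     op = "+"
--     accum = 0
--     s += ";" # to end processing
--     for c in s:
--         if c.isdigit():
--             # parsing an integer
--             accum = accum * 10 + int(c)
--         else:
--             # done parsing integer, merge into result using
--             # previous op
--             if op == "+":
--                 res += accum
--             else:
--                 res -= accum
--             accum = 0
--             # parse next op, or ignore foreign character
--             if c == "+" or c == "-":
--                 op = c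
--     # Fix range to [0..sxy[
--     while res < 0:
--         res += sxy
--     while res > sxy:
--         res -= sxy
--     return res
-- ===== SOURCE B (Python) =====
-- def _parseInt(s: str, sxy: int) -> int:
--     # Tokenize: scan maximal digit runs, each contributes with the sign of the
--     # last '+'/'-' seen before it; then wrap with one closed-form modular
--     # reduction instead of A's repeated add/subtract loops.
--     total = 0
--     sign = 1
--     i = 0
--     n = len(s)
--     while i < n:
--         c = s[i]
--         if c.isdigit():
--             num = 0
--             while i < n and s[i].isdigit():
--                 num = num * 10 + (ord(s[i]) - 48)
--                 i += 1
--             total += sign * num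
--         else:
--             if c == "+":
--                 sign = 1
--             elif c == "-":
--                 sign = -1
--             i += 1
--     if total < 0:
--         total %= sxy
--     elif total > sxy:
--         r = total % sxy
--         total = r if r else sxy
--     return total
-- ===== Notes on version B (the rewrite author's own statement) =====
-- stated objective: alternative
-- what changed: B tokenizes the string into signed maximal digit runs in one scan and replaces A's repeated add/subtract wrap loops by a single closed-form modular reduction (with the res == k*sxy > 0 case mapped to sxy, matching A's strict '>' bound).
-- outside the precondition, e.g. on _parseInt('', 0): A returns 0, B returns 0; on _parseInt('5', 0): A does not finish within the time limit, B raises ZeroDivisionError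
import Mathlib
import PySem

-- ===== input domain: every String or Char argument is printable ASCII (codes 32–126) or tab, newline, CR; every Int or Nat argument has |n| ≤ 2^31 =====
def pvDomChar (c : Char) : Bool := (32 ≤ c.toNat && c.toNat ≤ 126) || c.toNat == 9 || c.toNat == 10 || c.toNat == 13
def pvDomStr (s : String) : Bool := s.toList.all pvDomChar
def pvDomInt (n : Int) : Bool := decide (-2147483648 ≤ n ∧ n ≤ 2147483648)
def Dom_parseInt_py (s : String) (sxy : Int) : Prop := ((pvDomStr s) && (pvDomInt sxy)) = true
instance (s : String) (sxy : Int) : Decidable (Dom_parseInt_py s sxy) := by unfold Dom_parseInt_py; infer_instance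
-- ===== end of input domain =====

-- B replaces A's repeated add/subtract wrap loops by one closed-form modular reduction
-- and scans each digit run as one token (objective: alternative algorithm, similar cost).

-- ===== PORT A =====
-- one step of A's `for c in s` loop; state = (res, op, accum).
-- `int(c)` is ported as `c.toNat - 48`, exact for the ASCII digit chars of Dom.
def stepA (st : Int × String × Int) (c : Char) : Int × String × Int :=
  if PySem.Chars.isdigit c then
    (st.1, st.2.1, st.2.2 * 10 + ((c.toNat : Int) - 48))
  else
    (if st.2.1 = "+" then st.1 + st.2.2 else st.1 - st.2.2,
     if c = '+' ∨ c = '-' then String.singleton c else st.2.1,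
     0)

-- `while res < 0: res += sxy`; the extra `0 < sxy` guard only makes the loop total
-- (for sxy ≤ 0 and res < 0 the Python loop never terminates; excluded by Pre_).
def loopUpA (res sxy : Int) : Int :=
  if _h : res < 0 ∧ 0 < sxy then loopUpA (res + sxy) sxy else res
termination_by (-res).toNat
decreasing_by omega

-- `while res > sxy: res -= sxy`; same totality guard.
def loopDnA (res sxy : Int) : Int :=
  if _h : sxy < res ∧ 0 < sxy then loopDnA (res - sxy) sxy else res
termination_by (res - sxy).toNat
decreasing_by omega

def parseInt_py (s : String) (sxy : Int) : Int :=
  loopDnA (loopUpA ((s.toList ++ [';']).foldl stepA (0, "+", 0)).1 sxy) sxy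

-- ===== PORT B =====
-- Source B's inner `while`: consume the digits at the head of l into num.
def takeNumB : List Char → Int → Int × List Char
  | [], num => (num, [])
  | c :: rest, num =>
    if PySem.Chars.isdigit c then takeNumB rest (num * 10 + ((c.toNat : Int) - 48))
    else (num, c :: rest)

theorem takeNumB_len_le : ∀ (l : List Char) (num : Int), (takeNumB l num).2.length ≤ l.length := by
  intro l
  induction l with
  | nil => intro num; simp [takeNumB]
  | cons c rest ih =>
    intro num
    by_cases h : PySem.Chars.isdigit c
    · simpa [takeNumB, h] using Nat.le_succ_of_le (ih _)
    · simp [takeNumB, h]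

-- Source B's outer `while i < n` loop; advancing i = consuming list elements.
def scanB : List Char → Int → Int → Int
  | [], _, total => total
  | c :: rest, sign, total =>
    if PySem.Chars.isdigit c then
      let p := takeNumB rest ((c.toNat : Int) - 48)
      scanB p.2 sign (total + sign * p.1)
    else
      scanB rest (if c = '+' then 1 else if c = '-' then -1 else sign) total
termination_by l => l.length
decreasing_by
  · exact Nat.lt_succ_of_le (takeNumB_len_le rest _)
  · simp

def parseInt_py_alt (s : String) (sxy : Int) : Int :=
  if scanB s.toList 1 0 < 0 then PySem.Int.mod (scanB s.toList 1 0) sxy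
  else if sxy < scanB s.toList 1 0 then
    (if PySem.Int.mod (scanB s.toList 1 0) sxy = 0 then sxy
     else PySem.Int.mod (scanB s.toList 1 0) sxy)
  else scanB s.toList 1 0

-- ===== PRECONDITION & SPEC =====
-- Pre_ excludes sxy ≤ 0: there A's wrap loops never terminate, except when the parsed
-- value is already 0 with sxy = 0 (e.g. ("", 0), where A returns 0 and B returns 0 too).
def Pre_parseInt_py (s : String) (sxy : Int) : Prop := 0 < sxy
instance (s : String) (sxy : Int) : Decidable (Pre_parseInt_py s sxy) := by unfold Pre_parseInt_py; infer_instance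

def pvWitness_parseInt_py : String × Int := ("12+3-4", 10)

def Spec_parseInt_py (s : String) (sxy : Int) (out : Int) : Prop := out = parseInt_py_alt s sxy
instance (s : String) (sxy : Int) (out : Int) : Decidable (Spec_parseInt_py s sxy out) := by unfold Spec_parseInt_py; infer_instance

-- ===== CLAIM (what is proved, stated in full; the proofs are below) =====
def Claim_equal_parseInt_py : Prop := ∀ (s : String) (sxy : Int), Dom_parseInt_py s sxy → Pre_parseInt_py s sxy → Spec_parseInt_py s sxy (parseInt_py s sxy)

-- ===== LEMMAS AND PROOFS =====

-- the Int sign encoded by A's op string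
def signOf (op : String) : Int := if op = "+" then 1 else -1

-- restarting B's scanner at a (possibly empty) digit run is a no-op
theorem scan_start (l : List Char) (s t : Int) :
    scanB (takeNumB l 0).2 s (t + s * (takeNumB l 0).1) = scanB l s t := by
  cases l with
  | nil => simp [takeNumB, scanB]
  | cons c rest =>
    by_cases h : PySem.Chars.isdigit c
    · simp [takeNumB, scanB, h]
    · simp [takeNumB, scanB, h]

-- the parse phases agree: A's char-at-a-time fold = B's run-at-a-time scan
theorem parse_main : ∀ (l : List Char) (res accum : Int) (op : String), (op = "+" ∨ op = "-") →
    ((l ++ [';']).foldl stepA (res, op, accum)).1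
      = scanB (takeNumB l accum).2 (signOf op) (res + signOf op * (takeNumB l accum).1) := by
  intro l
  induction l with
  | nil =>
    intro res accum op hop
    have hd : PySem.Chars.isdigit ';' = false := by decide
    rcases hop with h | h <;> subst h <;>
      simp [stepA, takeNumB, scanB, signOf, hd] <;> ring
  | cons c rest ih =>
    intro res accum op hop
    by_cases h : PySem.Chars.isdigit c
    · simp only [List.cons_append, List.foldl_cons, stepA, h, if_true, takeNumB]
      exact ih res (accum * 10 + ((c.toNat : Int) - 48)) op hop
    · have hop' : (if c = '+' ∨ c = '-' then String.singleton c else op) = "+" ∨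
                  (if c = '+' ∨ c = '-' then String.singleton c else op) = "-" := by
        by_cases hc : c = '+' ∨ c = '-'
        · rcases hc with hc | hc <;> subst hc <;> simp <;> decide
        · simpa [hc] using hop
      have := ih (if op = "+" then res + accum else res - accum) 0
        (if c = '+' ∨ c = '-' then String.singleton c else op) hop'
      have hne : PySem.Chars.isdigit c = false := by simpa using h
      simp only [List.cons_append, List.foldl_cons, stepA, hne, Bool.false_eq_true,
        if_false] at this ⊢
      rw [this, scan_start]
      -- both sides are scanB rest sign' total' — show the sign/total arguments agree
      have harg1 : signOf (if c = '+' ∨ c = '-' then String.singleton c else op)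
          = (if c = '+' then 1 else if c = '-' then -1 else signOf op) := by
        by_cases h1 : c = '+'
        · subst h1; simp [signOf]; decide
        · by_cases h2 : c = '-'
          · subst h2; simp [signOf, h1]; decide
          · simp [h1, h2, signOf]
      have harg2 : (if op = "+" then res + accum else res - accum) = res + signOf op * accum := by
        rcases hop with h3 | h3 <;> subst h3 <;> simp [signOf] <;> ring
      rw [harg2, harg1]
      simp only [takeNumB, hne, Bool.false_eq_true, if_false]
      rw [show scanB (c :: rest) (signOf op) (res + signOf op * accum)
            = scanB rest (if c = '+' then 1 else if c = '-' then -1 else signOf op)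
                (res + signOf op * accum) by rw [scanB]; simp [hne]]

-- A's first wrap loop is one floored mod (for 0 < sxy)
theorem loopUpA_eq (res sxy : Int) (hs : 0 < sxy) :
    loopUpA res sxy = if res < 0 then res % sxy else res := by
  induction res using loopUpA.induct sxy with
  | case1 res h ih =>
    rw [loopUpA, dif_pos h]
    rw [ih]
    have hmod : (res + sxy) % sxy = res % sxy := by
      have := Int.add_mul_emod_self_left (a := res) (b := sxy) (c := 1)
      simpa using this
    by_cases h2 : res + sxy < 0
    · simp [h2, h.1, hmod]
    · have : (res + sxy) % sxy = res + sxy :=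
        Int.emod_eq_of_lt (by omega) (by omega)
      simp [h2, h.1]
      omega
  | case2 res h =>
    rw [loopUpA, dif_neg h]
    have : ¬ res < 0 := by tauto
    simp [this]

-- A's second wrap loop is one floored mod, except that multiples of sxy map to sxy (strict '>')
theorem loopDnA_eq (res sxy : Int) (hs : 0 < sxy) :
    loopDnA res sxy = if sxy < res then (if res % sxy = 0 then sxy else res % sxy) else res := by
  induction res using loopDnA.induct sxy with
  | case1 res h ih =>
    rw [loopDnA, dif_pos h]
    rw [ih]
    have hmod : (res - sxy) % sxy = res % sxy := by
      have := Int.add_mul_emod_self_left (a := res) (b := sxy) (c := -1)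
      simpa [sub_eq_add_neg] using this
    by_cases h2 : sxy < res - sxy
    · simp [h2, h.1, hmod]
    · -- sxy < res ≤ 2·sxy: the loop stops at res - sxy
      by_cases h3 : res - sxy = sxy
      · have : res % sxy = 0 := by
          rw [← hmod, h3]; simp
        simp [h2, h.1, this]; omega
      · have hlt : res - sxy < sxy := by omega
        have : res % sxy = res - sxy := by
          rw [← hmod]; exact Int.emod_eq_of_lt (by omega) hlt
        simp [h2, h.1, this]
        omega
  | case2 res h =>
    rw [loopDnA, dif_neg h]
    have : ¬ sxy < res := by tauto
    simp [this]

-- ===== VERDICT (by name: the statement is the Claim_ definition above) =====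
theorem parseInt_py_spec : Claim_equal_parseInt_py := by
  intro s sxy _hdom hpre
  have hs : 0 < sxy := hpre
  unfold Spec_parseInt_py parseInt_py parseInt_py_alt
  have hparse : ((s.toList ++ [';']).foldl stepA (0, "+", 0)).1 = scanB s.toList 1 0 := by
    have := parse_main s.toList 0 0 "+" (Or.inl rfl)
    simpa [signOf] using this.trans (scan_start s.toList 1 0)
  rw [hparse]
  set total := scanB s.toList 1 0 with htot
  rw [PySem.Int.mod_eq_emod_of_pos hs]
  by_cases h1 : total < 0
  · rw [loopUpA_eq total sxy hs, if_pos h1]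
    have hnn : 0 ≤ total % sxy := Int.emod_nonneg total (by omega)
    have hlt : total % sxy < sxy := Int.emod_lt_of_pos total hs
    rw [loopDnA_eq _ sxy hs, if_neg (by omega)]
    simp [h1]
  · rw [loopUpA_eq total sxy hs, if_neg h1, loopDnA_eq total sxy hs]
    simp [h1]
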